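-- pv_equiv track=rewrite | github.com/DaveVermeire/HangMan-game-with-sound | hangman.py | unique_index
-- ===== SOURCE A (Python) =====
-- def unique_index(lst: list):
--     oc_set = set()
--     rest = []
--     for index, value in enumerate(lst):
--         if value not in oc_set:
--             oc_set.add(value)
--         else:
--             rest.append(index)
--     return rest
-- ===== SOURCE B (Python) =====
-- def unique_index(lst: list):
--     # Pass 1: first-occurrence index per value.
--     first = {}
--     for index, value in enumerate(lst):
--         if value not in first:
--             first[value] = index
--     # Pass 2: an index is a duplicate iff it is not its value's first occurrence.
--     return [index for index, value in enumerate(lst) if first[value] != index]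
-- ===== Notes on version B (the rewrite author's own statement) =====
-- stated objective: alternative
-- what changed: Replaced the single streaming seen-set loop by two passes: one building a first-occurrence index table, then a filtering pass that keeps every index differing from its value's first occurrence.
import Mathlib
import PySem

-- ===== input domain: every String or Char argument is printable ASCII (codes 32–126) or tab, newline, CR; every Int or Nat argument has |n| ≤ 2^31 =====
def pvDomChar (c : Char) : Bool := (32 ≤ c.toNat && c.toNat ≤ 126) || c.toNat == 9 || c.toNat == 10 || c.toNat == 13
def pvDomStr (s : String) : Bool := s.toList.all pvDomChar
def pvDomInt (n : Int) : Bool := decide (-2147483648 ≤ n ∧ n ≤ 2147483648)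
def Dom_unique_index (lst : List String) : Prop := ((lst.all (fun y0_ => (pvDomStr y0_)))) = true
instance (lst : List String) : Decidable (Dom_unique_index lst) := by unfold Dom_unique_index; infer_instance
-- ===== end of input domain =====

-- B replaces A's single streaming seen-set loop by two passes: a first-occurrence
-- index table, then a filter keeping indices that are not their value's first occurrence.


-- ===== PORT A =====
def unique_index (lst : List String) : List Int :=
  ((PySem.List.enumerate lst 0).foldl
    (fun (st : PySem.Set String × List Int) p =>
      if ¬ PySem.Set.contains st.1 p.2 then (PySem.Set.add st.1 p.2, st.2)
      else (st.1, st.2 ++ [p.1]))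
    (PySem.Set.empty, [])).2

-- ===== PORT B =====
-- pass 1: first-occurrence table (record only when the value is not a key yet)
def uiFirst (lst : List String) : PySem.Dict String Int :=
  (PySem.List.enumerate lst 0).foldl
    (fun d p => if ¬ d.contains p.2 then d.insert p.2 p.1 else d) PySem.Dict.empty
-- pass 2: keep indices whose value's first occurrence differs (the key is always
-- present, so getD's default is never used — Python's first[value] never raises here)
def unique_index_alt (lst : List String) : List Int :=
  ((PySem.List.enumerate lst 0).filter (fun p => (uiFirst lst).getD p.2 (-1) != p.1)).map (·.1)

-- ===== PRECONDITION & SPEC =====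
def Spec_unique_index (lst : List String) (out : List Int) : Prop := out = unique_index_alt lst
instance (lst : List String) (out : List Int) : Decidable (Spec_unique_index lst out) := by unfold Spec_unique_index; infer_instance

-- ===== CLAIM (what is proved, stated in full; the proofs are below) =====
def Claim_equal_unique_index : Prop := ∀ (lst : List String), Dom_unique_index lst → Spec_unique_index lst (unique_index lst)

-- ===== LEMMAS AND PROOFS =====

-- reference function: indices of non-first occurrences, with `pre` the values already seen
def uiRef (pre : List String) (s : Int) : List String → List Int
  | [] => []
  | x :: xs => if x ∈ pre then s :: uiRef (pre ++ [x]) (s + 1) xs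
               else uiRef (pre ++ [x]) (s + 1) xs

theorem ofList_append_singleton (pre : List String) (x : String) :
    PySem.Set.ofList (pre ++ [x]) = PySem.Set.add (PySem.Set.ofList pre) x := by
  simp [PySem.Set.ofList_eq_foldl, List.foldl_append]

theorem A_fold (xs : List String) : ∀ (s : Int) (pre : List String) (acc : List Int),
    ((PySem.List.enumerate xs s).foldl
      (fun (st : PySem.Set String × List Int) p =>
        if ¬ PySem.Set.contains st.1 p.2 then (PySem.Set.add st.1 p.2, st.2)
        else (st.1, st.2 ++ [p.1]))
      (PySem.Set.ofList pre, acc)).2 = acc ++ uiRef pre s xs := by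
  induction xs with
  | nil => intro s pre acc; simp [PySem.List.enumerate_nil, uiRef]
  | cons x xs ih =>
    intro s pre acc
    rw [PySem.List.enumerate_cons]
    simp only [List.foldl_cons]
    have hstep : (if ¬ PySem.Set.contains (PySem.Set.ofList pre) x
          then (PySem.Set.add (PySem.Set.ofList pre) x, acc)
          else (PySem.Set.ofList pre, acc ++ [s]))
        = if x ∈ pre then (PySem.Set.ofList (pre ++ [x]), acc ++ [s])
          else (PySem.Set.ofList (pre ++ [x]), acc) := by
      by_cases hx : x ∈ pre
      · have hc : PySem.Set.contains (PySem.Set.ofList pre) x = true := by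
          simp [PySem.Set.mem_ofList, hx]
        rw [if_neg (by simp [PySem.Set.mem_ofList, hx]), if_pos hx, ofList_append_singleton,
          PySem.Set.add_of_mem (by simp [PySem.Set.mem_ofList, hx])]
      · have hc : PySem.Set.contains (PySem.Set.ofList pre) x = false := by
          simp [PySem.Set.mem_ofList, hx]
        rw [if_pos (by simp [PySem.Set.mem_ofList, hx]), if_neg hx, ofList_append_singleton]
    rw [hstep]
    by_cases hx : x ∈ pre
    · rw [if_pos hx, ih (s + 1) (pre ++ [x]) (acc ++ [s])]
      simp [uiRef, hx]
    · rw [if_neg hx, ih (s + 1) (pre ++ [x]) acc]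
      simp [uiRef, hx]

-- characterisation of the first-occurrence table
theorem uiFirst_get? (xs : List String) : ∀ (s : Int) (d : PySem.Dict String Int) (v : String),
    ((PySem.List.enumerate xs s).foldl
      (fun d p => if ¬ d.contains p.2 then d.insert p.2 p.1 else d) d).get? v =
    match d.get? v with
    | some i => some i
    | none => ((PySem.List.enumerate xs s).find? (fun p => p.2 == v)).map (·.1) := by
  induction xs with
  | nil =>
    intro s d v
    rw [PySem.List.enumerate_nil]
    cases h : d.get? v <;> simp [h]
  | cons x xs ih =>
    intro s d v
    rw [PySem.List.enumerate_cons]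
    simp only [List.foldl_cons, List.find?]
    by_cases hcd : d.contains x = true
    · rw [if_neg (by simp [hcd])]
      rw [ih]
      by_cases hxv : x = v
      · subst hxv
        have hi : ∃ i, d.get? x = some i := by
          rcases h : d.get? x with _ | i
          · rw [PySem.Dict.contains_eq_isSome_get?, h] at hcd; simp at hcd
          · exact ⟨i, rfl⟩
        rcases hi with ⟨i, hi⟩
        simp [hi]
      · have hb : (x == v) = false := by simp [hxv]
        rw [hb]
    · rw [if_pos (by simp [hcd])]
      rw [ih]
      by_cases hxv : x = v
      · subst hxv
        have hd : d.get? x = none := by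
          rw [PySem.Dict.contains_eq_isSome_get?] at hcd
          rcases h : d.get? x with _ | i
          · rfl
          · rw [h] at hcd; simp at hcd
        simp [hd, PySem.Dict.get?_insert_self]
      · have hne : v ≠ x := fun h => hxv h.symm
        rw [PySem.Dict.get?_insert, if_neg hne]
        have hb : (x == v) = false := by simp [hxv]
        rw [hb]

theorem find?_enumerate_idxOf (xs : List String) : ∀ (s : Int) (v : String), v ∈ xs →
    (PySem.List.enumerate xs s).find? (fun p => p.2 == v) =
      some (s + (List.idxOf v xs : Int), v) := by
  induction xs with
  | nil => intro s v h; simp at h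
  | cons x xs ih =>
    intro s v hv
    rw [PySem.List.enumerate_cons]
    simp only [List.find?]
    by_cases hxv : x = v
    · subst hxv; simp [List.idxOf_cons_self]
    · have hv' : v ∈ xs := by
        cases hv with
        | head => exact absurd rfl hxv
        | tail _ h => exact h
      have hb : (x == v) = false := by simp [hxv]
      rw [hb]
      rw [ih (s + 1) v hv']
      have hI : List.idxOf v (x :: xs) = List.idxOf v xs + 1 := by
        rw [List.idxOf_cons, hb]; rfl
      rw [hI]
      simp only [Option.some.injEq, Prod.mk.injEq]
      exact ⟨by push_cast; ring, trivial⟩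

theorem mem_take_iff_idxOf_ne (xs : List String) : ∀ (k : Nat) (h : k < xs.length),
    (xs[k] ∈ xs.take k ↔ List.idxOf xs[k] xs ≠ k) := by
  induction xs with
  | nil => intro k h; simp at h
  | cons x xs ih =>
    intro k h
    cases k with
    | zero => simp [List.idxOf_cons_self]
    | succ k =>
      have hk : k < xs.length := by simpa using h
      simp only [List.take_succ_cons, List.getElem_cons_succ, List.mem_cons]
      by_cases hx : xs[k] = x
      · have hI : List.idxOf xs[k] (x :: xs) = 0 := by
          rw [hx]; exact List.idxOf_cons_self
        rw [hI]
        simp [hx]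
      · have hb : (x == xs[k]) = false := by
          simp only [beq_eq_false_iff_ne, ne_eq]
          exact fun hh => hx hh.symm
        have hI : List.idxOf xs[k] (x :: xs) = List.idxOf xs[k] xs + 1 := by
          rw [List.idxOf_cons, hb]; rfl
        rw [hI, ih k hk]
        constructor
        · rintro (h1 | h1)
          · exact absurd h1 hx
          · omega
        · intro h1; right; omega

theorem B_filter (D : PySem.Dict String Int) (xs : List String) :
    ∀ (s : Int) (pre : List String),
    (∀ (k : Nat) (h : k < xs.length),
        (D.getD xs[k] (-1) ≠ s + (k : Int)) ↔ xs[k] ∈ pre ++ xs.take k) →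
    ((PySem.List.enumerate xs s).filter (fun p => D.getD p.2 (-1) != p.1)).map (·.1)
      = uiRef pre s xs := by
  induction xs with
  | nil => intro s pre _; simp [PySem.List.enumerate_nil, uiRef]
  | cons x xs ih =>
    intro s pre hyp
    rw [PySem.List.enumerate_cons]
    have h0 := hyp 0 (by simp)
    simp only [List.getElem_cons_zero, List.take_zero, List.append_nil, Nat.cast_zero,
      Int.add_zero] at h0
    have htail : ∀ (k : Nat) (h : k < xs.length),
        (D.getD xs[k] (-1) ≠ (s + 1) + (k : Int)) ↔ xs[k] ∈ (pre ++ [x]) ++ xs.take k := by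
      intro k hk
      have h1 := hyp (k + 1) (by simpa using Nat.succ_lt_succ hk)
      simp only [List.getElem_cons_succ, List.take_succ_cons] at h1
      have hcast : s + (((k + 1 : Nat)) : Int) = s + 1 + (k : Int) := by push_cast; ring
      rw [hcast] at h1
      rw [h1]
      simp [List.append_assoc]
    rw [List.filter_cons]
    by_cases hx : x ∈ pre
    · have hcond : (D.getD x (-1) != s) = true := by
        simp only [bne_iff_ne, ne_eq]
        exact h0.mpr hx
      rw [if_pos hcond, List.map_cons, ih (s + 1) (pre ++ [x]) htail]
      simp [uiRef, hx]
    · have hcond : (D.getD x (-1) != s) = false := by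
        simp only [bne_eq_false_iff_eq]
        by_contra hne
        exact hx (h0.mp (by simpa using hne))
      rw [if_neg (by simp [hcond]), ih (s + 1) (pre ++ [x]) htail]
      simp [uiRef, hx]

theorem uiFirst_getD (lst : List String) (k : Nat) (h : k < lst.length) :
    (uiFirst lst).getD lst[k] (-1) = (List.idxOf lst[k] lst : Int) := by
  unfold uiFirst
  rw [PySem.Dict.getD_eq_get?_getD, uiFirst_get?]
  have hmem : lst[k] ∈ lst := List.getElem_mem h
  rw [find?_enumerate_idxOf lst 0 _ hmem]
  simp [PySem.Dict.get?_empty]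

-- ===== VERDICT (by name: the statement is the Claim_ definition above) =====
theorem unique_index_spec : Claim_equal_unique_index := by
  intro lst _
  unfold Spec_unique_index unique_index unique_index_alt
  rw [show (PySem.Set.empty : PySem.Set String) = PySem.Set.ofList [] from rfl]
  rw [A_fold lst 0 [] [], List.nil_append]
  rw [B_filter (uiFirst lst) lst 0 []]
  intro k hk
  rw [uiFirst_getD lst k hk, List.nil_append, mem_take_iff_idxOf_ne lst k hk]
  omega
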